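-- pv_equiv track=rewrite | github.com/leonidasserra/digital-signal-processing | P1/rampa.py | rampa
-- ===== SOURCE A (Python) =====
-- def rampa(n):
--     array=[]
--     for i in range (2*n+1):
--         if(i>=n):
--             array.append(i-n)
--
--         else:
--             array.append(0)
--     return array
-- ===== SOURCE B (Python) =====
-- def rampa(n):
--     # simpler: the output is n zeros followed by 0..n, built as two segments
--     return [0] * n + list(range(n + 1))
-- ===== Notes on version B (the rewrite author's own statement) =====
-- stated objective: simpler
-- what changed: Replaces the single loop with a per-element branch by direct construction of the two segments: n zeros concatenated with the increasing ramp from range.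
import Mathlib
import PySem

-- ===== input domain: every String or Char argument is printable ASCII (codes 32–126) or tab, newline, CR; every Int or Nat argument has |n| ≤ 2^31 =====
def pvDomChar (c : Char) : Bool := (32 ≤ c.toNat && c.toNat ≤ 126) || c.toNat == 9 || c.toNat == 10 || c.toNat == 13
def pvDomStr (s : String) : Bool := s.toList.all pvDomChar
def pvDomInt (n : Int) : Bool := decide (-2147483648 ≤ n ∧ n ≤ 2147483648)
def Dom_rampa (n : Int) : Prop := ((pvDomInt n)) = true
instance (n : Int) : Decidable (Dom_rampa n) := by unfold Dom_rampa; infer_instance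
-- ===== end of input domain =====

-- B builds the result as two segments (n zeros ++ range 0..n) instead of A's single
-- branching loop over range(2n+1); objective: simpler.

-- ===== PORT A =====
def rampa (n : Int) : List Int :=
  (PySem.List.pyRange 0 (2 * n + 1) 1).foldl
    (fun array i => if n ≤ i then array ++ [i - n] else array ++ [0]) []

-- ===== PORT B =====
def rampa_alt (n : Int) : List Int :=
  List.replicate n.toNat 0 ++ PySem.List.pyRange 0 (n + 1) 1

-- ===== PRECONDITION & SPEC =====
def Spec_rampa (n : Int) (out : List Int) : Prop := out = rampa_alt n
instance (n : Int) (out : List Int) : Decidable (Spec_rampa n out) := by unfold Spec_rampa; infer_instance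

-- ===== CLAIM (what is proved, stated in full; the proofs are below) =====
def Claim_equal_rampa : Prop := ∀ (n : Int), Dom_rampa n → Spec_rampa n (rampa n)

-- ===== LEMMAS AND PROOFS =====

theorem rampa_eq_map (n : Int) :
    rampa n = (PySem.List.pyRange 0 (2 * n + 1) 1).map (fun i => if n ≤ i then i - n else 0) := by
  unfold rampa
  have h := PySem.List.foldl_congr_mem
      (l := PySem.List.pyRange 0 (2 * n + 1) 1)
      (f := fun array i => if n ≤ i then array ++ [i - n] else array ++ [0])
      (g := fun array i => array ++ [if n ≤ i then i - n else 0])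
      (init := ([] : List Int))
      (by intro acc x _; simp only []; split <;> rfl)
  rw [h, PySem.List.foldl_append_singleton_eq_map]
  simp

-- ===== VERDICT (by name: the statement is the Claim_ definition above) =====
theorem rampa_spec : Claim_equal_rampa := by
  intro n _
  show rampa n = rampa_alt n
  rw [rampa_eq_map]
  unfold rampa_alt
  by_cases hn : 0 ≤ n
  · rw [PySem.List.pyRange_one_append 0 n (2 * n + 1) hn (by omega), List.map_append]
    congr 1
    · rw [List.map_congr_left (g := fun _ => (0 : Int))
        (by intro x hx
            rw [PySem.List.mem_pyRange_one] at hx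
            simp [show ¬ n ≤ x by omega]),
        List.map_const', PySem.List.length_pyRange_one]
      simp
    · rw [PySem.List.pyRange_one, PySem.List.pyRange_one, List.map_map,
        show (2 * n + 1 - n) = (n + 1 - 0) by ring]
      apply List.map_congr_left
      intro k _
      simp
  · rw [PySem.List.pyRange_one_eq_nil (by omega), PySem.List.pyRange_one_eq_nil (by omega)]
    simp [Int.toNat_of_nonpos (by omega : n ≤ 0)]
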